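-- pv_equiv track=rewrite | github.com/ObsMob/fortasse | solver_enumeration.py | bitwise_index_check
-- ===== SOURCE A (Python) =====
-- import itertools
--
-- def bitwise_index_check(indexed_constraint, component):
--     # creates a list of 'bit' vectors(?), eg {0,0}, {0,1}, {1,0}, {1,1} to check against index based constraint.
--     # if all iterations of checking the bit vectors against each index in the component return the same value,
--     # that value = forced tile attribute at index of constraint.
--     passed_assignment = []
--
--     for possible_deduction in itertools.product((0,1), repeat=len(component)):
--         ok = True
--
--         for indices, mine_count in indexed_constraint:
--             if sum(possible_deduction[i] for i in indices) != mine_count: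
--                 ok = False
--                 break
--         if ok:
--             passed_assignment.append(possible_deduction)
--
--     if not passed_assignment:
--         return [], True
--     else:
--         return passed_assignment, False
-- ===== SOURCE B (Python) =====
-- def bitwise_index_check(indexed_constraint, component):
--     # Pruning DFS: assign bits left-to-right; check each constraint as soon as
--     # its highest index gets a value, cutting whole subtrees A enumerates.
--     n = len(component)
--     norm = [([i if i >= 0 else i + n for i in idxs], m)
--             for idxs, m in indexed_constraint]
--     if any(m != 0 for idxs, m in norm if not idxs):
--         return [], True
--
--     def dfs(k, bits):
--         if k == n:
--             return [tuple(bits)]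
--         res = []
--         for b in (0, 1):
--             nb = bits + [b]
--             if all(sum(nb[i] for i in idxs) == m
--                    for idxs, m in norm if idxs and max(idxs) == k):
--                 res += dfs(k + 1, nb)
--         return res
--
--     out = dfs(0, [])
--     return (out, False) if out else ([], True)
-- ===== Notes on version B (the rewrite author's own statement) =====
-- stated objective: alternative
-- what changed: Replaced the exhaustive itertools.product enumeration (every constraint re-checked on every full 2^n vector) with a recursive DFS that assigns bits 0-then-1 and checks each constraint exactly once, as soon as its highest (normalized) index is assigned, pruning whole subtrees early.
-- outside the precondition, e.g. on bitwise_index_check([([0, 0], 1), ([9], 0)], [0, 1]): A returns ([], True), B returns ([], True)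
import Mathlib
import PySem

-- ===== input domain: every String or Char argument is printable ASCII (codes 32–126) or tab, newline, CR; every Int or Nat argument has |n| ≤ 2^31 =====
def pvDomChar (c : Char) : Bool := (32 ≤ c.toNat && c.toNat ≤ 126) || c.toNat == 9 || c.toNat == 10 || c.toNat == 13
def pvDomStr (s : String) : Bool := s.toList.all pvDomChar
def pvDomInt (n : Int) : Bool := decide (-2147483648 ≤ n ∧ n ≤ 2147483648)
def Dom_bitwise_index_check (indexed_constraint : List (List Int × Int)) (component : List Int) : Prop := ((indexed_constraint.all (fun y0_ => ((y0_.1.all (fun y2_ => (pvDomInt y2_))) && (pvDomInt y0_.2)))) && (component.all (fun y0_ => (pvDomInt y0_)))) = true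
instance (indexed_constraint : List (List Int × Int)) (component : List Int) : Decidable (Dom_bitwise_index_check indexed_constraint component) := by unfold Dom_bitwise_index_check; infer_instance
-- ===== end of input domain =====

-- B replaces A's exhaustive itertools.product enumeration with a pruning DFS that
-- checks each constraint once, when its highest index is assigned (objective: alternative).

-- ===== PORT A =====
-- itertools.product((0,1), repeat=n), in Python's order (first coordinate varies slowest)
def pyProducts : Nat → List (List Int)
  | 0 => [[]]
  | n+1 => (pyProducts n).map (fun t => 0 :: t) ++ (pyProducts n).map (fun t => 1 :: t)

-- sum(t[i] for i in idxs); pyGetD is exact where Pre_ guarantees indices in range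
def sumOn (t : List Int) (idxs : List Int) : Int :=
  (idxs.map (fun i => PySem.List.pyGetD t i 0)).sum

def bitwise_index_check (indexed_constraint : List (List Int × Int)) (component : List Int) : List (List Int) × Bool :=
  let passed := (pyProducts component.length).foldl
    (fun acc t =>
      if indexed_constraint.all (fun c => decide (sumOn t c.1 = c.2)) then acc ++ [t] else acc) []
  if passed = [] then ([], true) else (passed, false)

-- ===== PORT B =====
-- i if i >= 0 else i + n
def normIdx (n : Int) (i : Int) : Int := if 0 ≤ i then i else i + n

def normB (n : Int) (ic : List (List Int × Int)) : List (List Int × Int) :=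
  ic.map (fun c => (c.1.map (normIdx n), c.2))

-- max(idxs) for nonempty idxs
def pyMax (l : List Int) : Int := l.foldl max (l.headD 0)

-- all(sum(nb[i] for i in idxs) == m for idxs, m in norm if idxs and max(idxs) == k)
def levelOk (norm : List (List Int × Int)) (k : Int) (nb : List Int) : Bool :=
  norm.all (fun c => if c.1 ≠ [] ∧ pyMax c.1 = k then decide (sumOn nb c.1 = c.2) else true)

-- dfs(k, bits); recursion on remaining depth rem = n - k
def dfsB (norm : List (List Int × Int)) : Nat → Int → List Int → List (List Int)
  | 0, _, bits => [bits]
  | rem+1, k, bits =>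
      (if levelOk norm k (bits ++ [0]) then dfsB norm rem (k+1) (bits ++ [0]) else []) ++
      (if levelOk norm k (bits ++ [1]) then dfsB norm rem (k+1) (bits ++ [1]) else [])

def bitwise_index_check_alt (indexed_constraint : List (List Int × Int)) (component : List Int) : List (List Int) × Bool :=
  let n := component.length
  let norm := normB (n : Int) indexed_constraint
  if norm.any (fun c => c.1.isEmpty && decide (c.2 ≠ 0)) then ([], true)
  else
    let out := dfsB norm n 0 []
    if out = [] then ([], true) else (out, false)

-- ===== PRECONDITION & SPEC =====
-- a constraint no bit vector can satisfy: mine_count < 0 or mine_count > number of index terms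
def impC (c : List Int × Int) : Bool := decide (c.2 < 0) || decide ((c.1.length : Int) < c.2)
-- the prefix of constraints whose indices are all below n (readable without IndexError)
def readUpTo (n : Int) (ic : List (List Int × Int)) : List (List Int × Int) :=
  ic.takeWhile (fun c => c.1.all (fun i => decide (i < n)))

-- Pre_ admits inputs whose constraint indices are all in [-len(component), len(component)),
-- and also inputs whose indices are all ≥ -len(component) where an arithmetically impossible
-- constraint occurs before any index ≥ len(component): there A never reaches the bad index
-- and returns ([], True). Excluded are only the remaining out-of-range-index inputs, on which
-- A raises IndexError except when earlier constraints happen to prune every bit vector first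
-- (an accident of evaluation order; B returns ([], True) there too).
def Pre_bitwise_index_check (indexed_constraint : List (List Int × Int)) (component : List Int) : Prop :=
  (∀ c ∈ indexed_constraint, ∀ i ∈ c.1,
    -(component.length : Int) ≤ i ∧ i < (component.length : Int))
  ∨ ((∀ c ∈ indexed_constraint, ∀ i ∈ c.1, -(component.length : Int) ≤ i)
     ∧ (readUpTo (component.length : Int) indexed_constraint).any impC = true)
instance (indexed_constraint : List (List Int × Int)) (component : List Int) : Decidable (Pre_bitwise_index_check indexed_constraint component) := by unfold Pre_bitwise_index_check; infer_instance

def pvWitness_bitwise_index_check : (List (List Int × Int)) × List Int :=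
  ([([0], 1), ([0, -1], 1)], [7, 7])

def Spec_bitwise_index_check (indexed_constraint : List (List Int × Int)) (component : List Int) (out : List (List Int) × Bool) : Prop := out = bitwise_index_check_alt indexed_constraint component
instance (indexed_constraint : List (List Int × Int)) (component : List Int) (out : List (List Int) × Bool) : Decidable (Spec_bitwise_index_check indexed_constraint component out) := by unfold Spec_bitwise_index_check; infer_instance

-- ===== CLAIM (what is proved, stated in full; the proofs are below) =====
def Claim_equal_bitwise_index_check : Prop := ∀ (indexed_constraint : List (List Int × Int)) (component : List Int), Dom_bitwise_index_check indexed_constraint component → Pre_bitwise_index_check indexed_constraint component → Spec_bitwise_index_check indexed_constraint component (bitwise_index_check indexed_constraint component)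

-- ===== LEMMAS AND PROOFS =====

-- fold-max bounds
theorem le_foldl_max (l : List Int) (b : Int) : b ≤ l.foldl max b := by
  induction l generalizing b with
  | nil => simp
  | cons h t ih => exact le_trans (le_max_left b h) (ih (max b h))

theorem mem_le_foldl_max {a : Int} {l : List Int} (b : Int) (h : a ∈ l) : a ≤ l.foldl max b := by
  induction l generalizing b with
  | nil => cases h
  | cons x t ih =>
    rcases List.mem_cons.mp h with rfl | h'
    · exact le_trans (le_max_right b a) (le_foldl_max t _)
    · exact ih _ h'

theorem foldl_max_lt {l : List Int} {b B : Int} (hb : b < B) (h : ∀ a ∈ l, a < B) :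
    l.foldl max b < B := by
  induction l generalizing b with
  | nil => simpa using hb
  | cons x t ih =>
    exact ih (max_lt hb (h x (List.mem_cons_self))) (fun a ha => h a (List.mem_cons_of_mem _ ha))

theorem mem_le_pyMax {a : Int} {l : List Int} (h : a ∈ l) : a ≤ pyMax l :=
  mem_le_foldl_max _ h

theorem pyMax_lt {l : List Int} {B : Int} (hne : l ≠ []) (h : ∀ a ∈ l, a < B) : pyMax l < B := by
  cases l with
  | nil => exact absurd rfl hne
  | cons x t => exact foldl_max_lt (by simpa using h x (List.mem_cons_self)) h

theorem pyMax_nonneg {l : List Int} (hne : l ≠ []) (h : ∀ a ∈ l, 0 ≤ a) : 0 ≤ pyMax l := by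
  cases l with
  | nil => exact absurd rfl hne
  | cons x t => exact le_trans (h x (List.mem_cons_self)) (mem_le_pyMax (List.mem_cons_self))

-- pointwise-on-members congruence for List.all
theorem all_congr_mem {α : Type} {l : List α} {p q : α → Bool}
    (h : ∀ x ∈ l, p x = q x) : l.all p = l.all q := by
  induction l with
  | nil => rfl
  | cons x t ih =>
    simp only [List.all_cons, h x (List.mem_cons_self),
      ih (fun c hc => h c (List.mem_cons_of_mem _ hc))]

-- Bool all splits pointwise
theorem all_split {α : Type} {l : List α} {f g h : α → Bool}
    (H : ∀ c ∈ l, f c = (g c && h c)) : l.all f = (l.all g && l.all h) := by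
  induction l with
  | nil => rfl
  | cons x t ih =>
    simp only [List.all_cons, H x (List.mem_cons_self),
      ih (fun c hc => H c (List.mem_cons_of_mem _ hc))]
    cases g x <;> cases h x <;> simp

-- indexing a list at an in-range nonnegative index ignores a suffix
theorem pyGetD_append_left {v s : List Int} {i : Int} (h0 : 0 ≤ i) (h1 : i < (v.length : Int)) :
    PySem.List.pyGetD (v ++ s) i 0 = PySem.List.pyGetD v i 0 := by
  simp only [PySem.List.pyGetD, PySem.List.pyGet?, PySem.List.pyIdx?, List.length_append]
  have h2 : i < ((v.length + s.length : Nat) : Int) := by push_cast; omega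
  rw [if_pos h0, if_pos h1, if_pos h0, if_pos h2]
  simp only [Option.bind_some]
  rw [List.getElem?_append_left (by omega)]

theorem sumOn_append {v s : List Int} {idxs : List Int}
    (h : ∀ i ∈ idxs, 0 ≤ i ∧ i < (v.length : Int)) :
    sumOn (v ++ s) idxs = sumOn v idxs := by
  unfold sumOn
  congr 1
  exact List.map_congr_left (fun i hi => pyGetD_append_left (h i hi).1 (h i hi).2)

-- normalized negative indexing agrees with Python's negative indexing
theorem pyGetD_normIdx {t : List Int} {i : Int}
    (h1 : -(t.length : Int) ≤ i) (h2 : i < (t.length : Int)) :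
    PySem.List.pyGetD t (normIdx (t.length : Int) i) 0 = PySem.List.pyGetD t i 0 := by
  unfold normIdx
  by_cases h0 : 0 ≤ i
  · rw [if_pos h0]
  · rw [if_neg h0]
    simp only [PySem.List.pyGetD, PySem.List.pyGet?, PySem.List.pyIdx?]
    have ha : 0 ≤ i + (t.length : Int) := by omega
    have hb : i + (t.length : Int) < (t.length : Int) := by omega
    rw [if_pos ha, if_pos hb, if_neg h0, if_pos h1]
    have h3 : (i + (t.length : Int)).toNat = t.length - (-i).toNat := by omega
    rw [h3]

theorem sumOn_normIdx {t : List Int} {idxs : List Int}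
    (h : ∀ i ∈ idxs, -(t.length : Int) ≤ i ∧ i < (t.length : Int)) :
    sumOn t (idxs.map (normIdx (t.length : Int))) = sumOn t idxs := by
  unfold sumOn
  rw [List.map_map]
  congr 1
  exact List.map_congr_left (fun i hi => pyGetD_normIdx (h i hi).1 (h i hi).2)

-- every element of pyProducts n has length n
theorem pyProducts_length {n : Nat} {t : List Int} (h : t ∈ pyProducts n) : t.length = n := by
  induction n generalizing t with
  | zero => simp [pyProducts] at h; simp [h]
  | succ m ih =>
    simp only [pyProducts, List.mem_append, List.mem_map] at h
    rcases h with ⟨s, hs, rfl⟩ | ⟨s, hs, rfl⟩ <;> simp [ih hs]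

-- B-side invariant: constraints whose max index falls in [k, k+rem)
def lvlRange (norm : List (List Int × Int)) (k : Int) (rem : Nat) (t : List Int) : Bool :=
  norm.all (fun c =>
    if c.1 ≠ [] ∧ k ≤ pyMax c.1 ∧ pyMax c.1 < k + (rem : Int)
    then decide (sumOn t c.1 = c.2) else true)

theorem dfsB_eq (norm : List (List Int × Int))
    (hnn : ∀ c ∈ norm, ∀ i ∈ c.1, 0 ≤ i) :
    ∀ (rem : Nat) (bits : List Int),
      dfsB norm rem (bits.length : Int) bits
        = ((pyProducts rem).map (fun s => bits ++ s)).filter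
            (lvlRange norm (bits.length : Int) rem) := by
  intro rem
  induction rem with
  | zero =>
    intro bits
    simp only [dfsB, pyProducts, List.map_cons, List.map_nil, List.append_nil]
    rw [List.filter_cons]
    have : lvlRange norm (bits.length : Int) 0 bits = true := by
      unfold lvlRange
      rw [List.all_eq_true]
      intro c _
      rw [if_neg]
      rintro ⟨-, h1, h2⟩
      omega
    rw [this]
    rfl
  | succ rem ih =>
    intro bits
    -- shape of the RHS
    have hsplit : ((pyProducts (rem+1)).map (fun s => bits ++ s)).filter
        (lvlRange norm (bits.length : Int) (rem+1))
        = (((pyProducts rem).map (fun s => (bits ++ [0]) ++ s)).filter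
            (lvlRange norm (bits.length : Int) (rem+1)))
          ++ (((pyProducts rem).map (fun s => (bits ++ [1]) ++ s)).filter
            (lvlRange norm (bits.length : Int) (rem+1))) := by
      simp only [pyProducts, List.map_append, List.map_map, List.filter_append]
      congr 2 <;> exact List.map_congr_left (fun s _ => by simp)
    rw [hsplit]
    have key : ∀ b : Int, (((pyProducts rem).map (fun s => (bits ++ [b]) ++ s)).filter
          (lvlRange norm (bits.length : Int) (rem+1)))
        = if levelOk norm (bits.length : Int) (bits ++ [b])
          then dfsB norm rem ((bits.length : Int) + 1) (bits ++ [b]) else [] := by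
      intro b
      set k : Int := (bits.length : Int) with hk
      -- pointwise split of the filter predicate on elements of the mapped list
      have hpt : ∀ t ∈ (pyProducts rem).map (fun s => (bits ++ [b]) ++ s),
          lvlRange norm k (rem+1) t
            = (levelOk norm k (bits ++ [b]) && lvlRange norm (k+1) rem t) := by
        intro t ht
        rcases List.mem_map.mp ht with ⟨s, -, rfl⟩
        unfold lvlRange levelOk
        apply all_split
        intro c hc
        by_cases hne : c.1 ≠ []
        · by_cases heq : pyMax c.1 = k
          · have hb : ∀ i ∈ c.1, 0 ≤ i ∧ i < ((bits ++ [b]).length : Int) := by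
              intro i hi
              refine ⟨hnn c hc i hi, ?_⟩
              have := mem_le_pyMax hi
              simp only [List.length_append, List.length_cons, List.length_nil]
              push_cast
              omega
            have hsum : sumOn ((bits ++ [b]) ++ s) c.1 = sumOn (bits ++ [b]) c.1 :=
              sumOn_append hb
            rw [if_pos ⟨hne, by omega, by push_cast; omega⟩, if_pos ⟨hne, heq⟩,
              if_neg (by rintro ⟨-, h1, -⟩; omega), hsum]
            simp
          · by_cases hin : k ≤ pyMax c.1 ∧ pyMax c.1 < k + ((rem:Int)+1)
            · rw [if_pos ⟨hne, hin.1, by push_cast; omega⟩, if_neg (by tauto),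
                if_pos ⟨hne, by omega, by omega⟩]
              simp
            · rw [if_neg (by push_cast; tauto), if_neg (by tauto),
                if_neg (by rintro ⟨-, h1, h2⟩; exact hin ⟨by omega, by omega⟩)]
              simp
        · rw [if_neg (by tauto), if_neg (by tauto), if_neg (by tauto)]
          simp
      rw [List.filter_congr hpt]
      by_cases hok : levelOk norm k (bits ++ [b]) = true
      · have h2 : dfsB norm rem (((bits ++ [b]).length : Nat) : Int) (bits ++ [b])
            = ((pyProducts rem).map (fun s => (bits ++ [b]) ++ s)).filter
                (lvlRange norm (((bits ++ [b]).length : Nat) : Int) rem) := ih (bits ++ [b])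
        have hlen : (((bits ++ [b]).length : Nat) : Int) = k + 1 := by
          simp [hk]
        rw [hlen] at h2
        rw [if_pos hok, h2]
        exact List.filter_congr (fun t _ => by rw [hok]; simp)
      · rw [if_neg hok]
        rw [List.filter_eq_nil_iff.mpr]
        intro t _
        simp [Bool.eq_false_iff.mp (by simpa using hok)]
    simp only [dfsB, key 0, key 1]

-- A's loop is a filter
theorem passedA_eq (ic : List (List Int × Int)) (n : Nat) :
    (pyProducts n).foldl
      (fun acc t => if ic.all (fun c => decide (sumOn t c.1 = c.2)) then acc ++ [t] else acc) []
    = (pyProducts n).filter (fun t => ic.all (fun c => decide (sumOn t c.1 = c.2))) := by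
  simpa using PySem.List.foldl_append_if_eq_filter
    (fun t => ic.all (fun c => decide (sumOn t c.1 = c.2))) (pyProducts n) []

-- ===== VERDICT (by name: the statement is the Claim_ definition above) =====
-- elements of pyProducts are bits
theorem pyProducts_bits {n : Nat} {t : List Int} (h : t ∈ pyProducts n) :
    ∀ x ∈ t, x = 0 ∨ x = 1 := by
  induction n generalizing t with
  | zero => simp [pyProducts] at h; simp [h]
  | succ m ih =>
    simp only [pyProducts, List.mem_append, List.mem_map] at h
    rcases h with ⟨s, hs, rfl⟩ | ⟨s, hs, rfl⟩ <;>
    · intro x hx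
      rcases List.mem_cons.mp hx with rfl | hx'
      · simp
      · exact ih hs x hx'

theorem pyGetD_bit {t : List Int} {i : Int} (h : ∀ x ∈ t, x = 0 ∨ x = 1) :
    PySem.List.pyGetD t i 0 = 0 ∨ PySem.List.pyGetD t i 0 = 1 := by
  unfold PySem.List.pyGetD
  cases hg : PySem.List.pyGet? t i with
  | none => simp
  | some x => simpa using h x (PySem.List.mem_of_pyGet?_eq_some (xs := t) hg)

theorem sumOn_bounds {t : List Int} (h : ∀ x ∈ t, x = 0 ∨ x = 1) (idxs : List Int) :
    0 ≤ sumOn t idxs ∧ sumOn t idxs ≤ (idxs.length : Int) := by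
  induction idxs with
  | nil => simp [sumOn]
  | cons i rest ih =>
    have hb := pyGetD_bit (i := i) h
    unfold sumOn at ih ⊢
    simp only [List.map_cons, List.sum_cons, List.length_cons]
    push_cast
    omega

-- an impossible constraint fails on every bit vector
theorem imp_check_false {t : List Int} {c : List Int × Int}
    (hbits : ∀ x ∈ t, x = 0 ∨ x = 1) (himp : impC c = true) :
    decide (sumOn t c.1 = c.2) = false := by
  have hs := sumOn_bounds hbits c.1
  simp only [impC, Bool.or_eq_true, decide_eq_true_eq] at himp
  simp only [decide_eq_false_iff_not]
  omega

-- ===== VERDICT continued: main proof =====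
theorem bitwise_index_check_spec : Claim_equal_bitwise_index_check := by
  intro ic comp _ hpre0
  unfold Spec_bitwise_index_check bitwise_index_check bitwise_index_check_alt
  set n := comp.length with hn
  set norm := normB (n : Int) ic with hnorm
  rw [passedA_eq]
  rcases hpre0 with hpre | ⟨hge, hany0⟩
  · -- rewrite A's check through normalization
    have hlen : ∀ t ∈ pyProducts n, t.length = n := fun t ht => pyProducts_length ht
    have hchk : ∀ t ∈ pyProducts n,
        ic.all (fun c => decide (sumOn t c.1 = c.2))
          = norm.all (fun c => decide (sumOn t c.1 = c.2)) := by
      intro t ht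
      rw [hnorm]
      unfold normB
      rw [List.all_map]
      apply all_congr_mem
      intro c hc
      simp only [Function.comp]
      have h : ∀ i ∈ c.1, -(t.length : Int) ≤ i ∧ i < (t.length : Int) := by
        intro i hi
        rw [hlen t ht]
        exact hpre c hc i hi
      rw [show (n : Int) = (t.length : Int) by rw [hlen t ht], sumOn_normIdx h]
    -- normalized indices are in [0, n)
    have hbound : ∀ c ∈ norm, ∀ i ∈ c.1, 0 ≤ i ∧ i < (n : Int) := by
      intro c hc i hi
      rw [hnorm] at hc
      unfold normB at hc
      rcases List.mem_map.mp hc with ⟨c0, hc0, rfl⟩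
      rcases List.mem_map.mp hi with ⟨i0, hi0, rfl⟩
      have := hpre c0 hc0 i0 hi0
      unfold normIdx
      rw [← hn] at this
      split <;> omega
    by_cases hany : norm.any (fun c => c.1.isEmpty && decide (c.2 ≠ 0)) = true
    · -- some empty-index constraint with m ≠ 0: nothing passes on either side
      rw [if_pos hany]
      rcases List.any_eq_true.mp hany with ⟨c, hc, hcp⟩
      simp only [Bool.and_eq_true, List.isEmpty_iff, decide_eq_true_eq] at hcp
      have hfail : ∀ t ∈ pyProducts n, ic.all (fun c => decide (sumOn t c.1 = c.2)) = false := by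
        intro t ht
        rw [hchk t ht]
        refine List.all_eq_false.mpr ⟨c, hc, ?_⟩
        simp only [sumOn, hcp.1, List.map_nil, List.sum_nil, decide_eq_true_eq]
        exact fun h => hcp.2 h.symm
      rw [List.filter_congr (q := fun _ => false) hfail]
      simp
    · rw [if_neg hany]
      have hempty : ∀ c ∈ norm, c.1 = [] → c.2 = 0 := by
        intro c hc h1
        by_contra h2
        exact hany (List.any_eq_true.mpr ⟨c, hc, by simp [h1, h2]⟩)
      -- full check = lvlRange at level 0 with span n
      have hfull : ∀ t ∈ pyProducts n,
          norm.all (fun c => decide (sumOn t c.1 = c.2)) = lvlRange norm 0 n t := by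
        intro t ht
        unfold lvlRange
        apply all_congr_mem
        intro c hc
        by_cases hne : c.1 = []
        · rw [if_neg (by tauto)]
          simp [hne, sumOn, hempty c hc hne]
        · rw [if_pos ⟨hne, pyMax_nonneg hne (fun a ha => (hbound c hc a ha).1),
            by simpa using pyMax_lt hne (fun a ha => (hbound c hc a ha).2)⟩]
      have hdfs := dfsB_eq norm (fun c hc i hi => (hbound c hc i hi).1) n []
      simp only [List.length_nil, Nat.cast_zero, List.nil_append] at hdfs
      rw [show ((pyProducts n).map (fun s => s)) = pyProducts n from List.map_id _] at hdfs
      rw [hdfs, ← List.filter_congr hfull, ← List.filter_congr hchk]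
  · -- an impossible constraint precedes every unreadable index: both sides return ([], true)
    obtain ⟨c, hcPref, hcImp⟩ := List.any_eq_true.mp hany0
    have hcIc : c ∈ ic := (List.takeWhile_sublist _).subset hcPref
    have hcRead : ∀ i ∈ c.1, i < (n : Int) := by
      have := List.mem_takeWhile_imp hcPref
      simpa using this
    have hfalse : ∀ t ∈ pyProducts n, ic.all (fun c => decide (sumOn t c.1 = c.2)) = false := by
      intro t ht
      exact List.all_eq_false.mpr ⟨c, hcIc, by
        simp [imp_check_false (pyProducts_bits ht) hcImp]⟩
    rw [List.filter_congr (q := fun _ => false) hfalse]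
    simp only [List.filter_false, if_pos]
    by_cases hany2 : norm.any (fun c => c.1.isEmpty && decide (c.2 ≠ 0)) = true
    · rw [if_pos hany2]
    · rw [if_neg hany2]
      have hcne : c.1 ≠ [] := by
        intro hnil
        apply hany2
        refine List.any_eq_true.mpr ⟨(c.1.map (normIdx (n : Int)), c.2), ?_, ?_⟩
        · rw [hnorm]; unfold normB; exact List.mem_map.mpr ⟨c, hcIc, rfl⟩
        · simp only [impC, Bool.or_eq_true, decide_eq_true_eq, hnil] at hcImp ⊢
          simp only [List.map_nil, List.isEmpty_nil, Bool.true_and, decide_eq_true_eq]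
          simp only [List.length_nil, Nat.cast_zero] at hcImp
          omega
      have hnn : ∀ c' ∈ norm, ∀ i ∈ c'.1, 0 ≤ i := by
        intro c' hc' i hi
        rw [hnorm] at hc'
        unfold normB at hc'
        rcases List.mem_map.mp hc' with ⟨c0, hc0, rfl⟩
        rcases List.mem_map.mp hi with ⟨i0, hi0, rfl⟩
        have := hge c0 hc0 i0 hi0
        unfold normIdx
        split <;> omega
      have hdfs := dfsB_eq norm hnn n []
      simp only [List.length_nil, Nat.cast_zero, List.nil_append] at hdfs
      rw [show ((pyProducts n).map (fun s => s)) = pyProducts n from List.map_id _] at hdfs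
      have hcmem : (c.1.map (normIdx (n : Int)), c.2) ∈ norm := by
        rw [hnorm]; unfold normB; exact List.mem_map.mpr ⟨c, hcIc, rfl⟩
      have hcbnd : ∀ i ∈ c.1.map (normIdx (n : Int)), 0 ≤ i ∧ i < (n : Int) := by
        intro i hi
        rcases List.mem_map.mp hi with ⟨i0, hi0, rfl⟩
        have h1 := hge c hcIc i0 hi0
        have h2 := hcRead i0 hi0
        unfold normIdx
        split <;> omega
      have hfail2 : ∀ t ∈ pyProducts n, lvlRange norm 0 n t = false := by
        intro t ht
        refine List.all_eq_false.mpr ⟨(c.1.map (normIdx (n : Int)), c.2), hcmem, ?_⟩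
        have hpm1 : 0 ≤ pyMax (c.1.map (normIdx (n : Int))) :=
          pyMax_nonneg (by simpa using hcne) (fun a ha => (hcbnd a ha).1)
        have hpm2 : pyMax (c.1.map (normIdx (n : Int))) < (n : Int) :=
          pyMax_lt (by simpa using hcne) (fun a ha => (hcbnd a ha).2)
        rw [if_pos ⟨by simpa using hcne, by omega, by simpa using hpm2⟩]
        have himp2 : impC (c.1.map (normIdx (n : Int)), c.2) = true := by
          simp only [impC, List.length_map] at hcImp ⊢
          exact hcImp
        simp [imp_check_false (pyProducts_bits ht) himp2]
      rw [hdfs, List.filter_congr (q := fun _ => false) hfail2]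
      simp
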